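-- pv_equiv track=rewrite | github.com/xpall/OMROpenCV | utlis.py | alignGrading
-- ===== SOURCE A (Python) =====
-- def alignGrading(grading):
--     alignedGrades = [
--         [0, 0], [0, 0], [0, 0], [0, 0], [0, 0],
--         [0, 0], [0, 0], [0, 0], [0, 0], [0, 0],
--         [0, 0, 0], [0, 0, 0], [0, 0, 0], [0, 0, 0], [0, 0, 0],
--         [0, 0, 0], [0, 0, 0], [0, 0, 0], [0, 0, 0], [0, 0, 0]
--         ]
--     rowNumber = 0
--     itemNumber = 0
--     for item in grading:
--         if itemNumber < 20:
--             alignedGrades[rowNumber][0] = item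
--             itemNumber += 1
--             rowNumber += 1
--         elif itemNumber < 40:
--             alignedGrades[rowNumber - 20][1] = item
--             itemNumber += 1
--             rowNumber += 1
--         else:
--             alignedGrades[rowNumber - 30][2] = item
--             rowNumber += 1
--     return alignedGrades
-- ===== SOURCE B (Python) =====
-- def alignGrading(grading):
--     grading = list(grading)
--     grid = [[0, 0] for _ in range(10)] + [[0, 0, 0] for _ in range(10)]
--     for r, v in enumerate(grading[0:20]):
--         grid[r][0] = v
--     for r, v in enumerate(grading[20:40]):
--         grid[r][1] = v
--     for r, v in enumerate(grading[40:]):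
--         grid[10 + r][2] = v
--     return grid
-- ===== Notes on version B (the rewrite author's own statement) =====
-- stated objective: alternative
-- what changed: Replaces A's single stateful loop with rowNumber/itemNumber counters and a three-way branch by three counter-free column-wise passes over the slices grading[0:20], grading[20:40] and grading[40:], each filling one grid column by enumerate index.
import Mathlib
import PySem

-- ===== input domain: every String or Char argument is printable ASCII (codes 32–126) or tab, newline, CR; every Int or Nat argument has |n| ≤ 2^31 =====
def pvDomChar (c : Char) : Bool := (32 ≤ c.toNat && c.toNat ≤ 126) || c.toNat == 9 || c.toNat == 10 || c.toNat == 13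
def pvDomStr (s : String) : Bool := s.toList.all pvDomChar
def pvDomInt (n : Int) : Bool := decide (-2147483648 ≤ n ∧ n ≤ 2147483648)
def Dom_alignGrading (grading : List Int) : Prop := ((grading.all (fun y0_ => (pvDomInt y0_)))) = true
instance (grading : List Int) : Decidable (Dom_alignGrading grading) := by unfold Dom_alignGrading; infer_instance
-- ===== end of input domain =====

-- B rebuilds the same 20-row grid with three column-wise slice passes instead of A's
-- single branching loop with two counters (objective: alternative decomposition, same cost).

-- Python `grid[r][c] = v` (nested in-place assignment); exact while r, c are in range —
-- Pre_ (length ≤ 50) excludes every input on which the Python raises IndexError.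
def pyAssign (grid : List (List Int)) (r : Int) (c : Int) (v : Int) : List (List Int) :=
  PySem.List.pySetD grid r (PySem.List.pySetD (PySem.List.pyGetD grid r []) c v)

-- ===== PORT A =====
def alignGradingInit : List (List Int) :=
  [[0, 0], [0, 0], [0, 0], [0, 0], [0, 0],
   [0, 0], [0, 0], [0, 0], [0, 0], [0, 0],
   [0, 0, 0], [0, 0, 0], [0, 0, 0], [0, 0, 0], [0, 0, 0],
   [0, 0, 0], [0, 0, 0], [0, 0, 0], [0, 0, 0], [0, 0, 0]]

-- the body of A's for-loop: state = (alignedGrades, rowNumber, itemNumber)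
def alignGradingStep (st : List (List Int) × Int × Int) (item : Int) :
    List (List Int) × Int × Int :=
  if st.2.2 < 20 then
    (pyAssign st.1 st.2.1 0 item, st.2.1 + 1, st.2.2 + 1)
  else if st.2.2 < 40 then
    (pyAssign st.1 (st.2.1 - 20) 1 item, st.2.1 + 1, st.2.2 + 1)
  else
    (pyAssign st.1 (st.2.1 - 30) 2 item, st.2.1 + 1, st.2.2)

def alignGrading (grading : List Int) : List (List Int) :=
  (grading.foldl alignGradingStep (alignGradingInit, 0, 0)).1

-- ===== PORT B =====
def alignGrading_alt (grading : List Int) : List (List Int) :=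
  -- three passes, sequenced by nesting: pass 3 (col 2) ∘ pass 2 (col 1) ∘ pass 1 (col 0) of grid0
  (PySem.List.enumerate (PySem.List.slice grading (some 40) none)).foldl
      (fun grid p => pyAssign grid (10 + p.1) 2 p.2)
    ((PySem.List.enumerate (PySem.List.slice grading (some 20) (some 40))).foldl
        (fun grid p => pyAssign grid p.1 1 p.2)
      ((PySem.List.enumerate (PySem.List.slice grading (some 0) (some 20))).foldl
          (fun grid p => pyAssign grid p.1 0 p.2)
        ((List.range 10).map (fun _ => ([0, 0] : List Int))
          ++ (List.range 10).map (fun _ => ([0, 0, 0] : List Int)))))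

-- ===== PRECONDITION & SPEC =====
-- More than 50 items make both programs raise IndexError (row 20 does not exist).
def Pre_alignGrading (grading : List Int) : Prop := grading.length ≤ 50
instance (grading : List Int) : Decidable (Pre_alignGrading grading) := by
  unfold Pre_alignGrading; infer_instance
def pvWitness_alignGrading : List Int := [3, 1, 2]

def Spec_alignGrading (grading : List Int) (out : List (List Int)) : Prop := out = alignGrading_alt grading
instance (grading : List Int) (out : List (List Int)) : Decidable (Spec_alignGrading grading out) := by unfold Spec_alignGrading; infer_instance

-- ===== CLAIM (what is proved, stated in full; the proofs are below) =====
def Claim_equal_alignGrading : Prop := ∀ (grading : List Int), Dom_alignGrading grading → Pre_alignGrading grading → Spec_alignGrading grading (alignGrading grading)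

-- ===== LEMMAS AND PROOFS =====

-- the unique cell item number n lands in (both programs write it there)
def applyCell (n : Nat) (x : Int) (grid : List (List Int)) : List (List Int) :=
  if n < 20 then pyAssign grid (n : Int) 0 x
  else if n < 40 then pyAssign grid ((n : Int) - 20) 1 x
  else pyAssign grid ((n : Int) - 30) 2 x

lemma stateA (g : List Int) : ∀ (ag : List (List Int)) (r i : Int), 0 ≤ i → i ≤ 40 →
    (g.foldl alignGradingStep (ag, r, i)).2.1 = r + g.length ∧
    (g.foldl alignGradingStep (ag, r, i)).2.2 = if i + (g.length : Int) ≤ 40 then i + g.length else 40 := by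
  induction g with
  | nil =>
    intro ag r i h0 h40
    refine ⟨by simp, ?_⟩
    simp only [List.foldl_nil, List.length_nil]
    split_ifs <;> push_cast at * <;> omega
  | cons a g ih =>
    intro ag r i h0 h40
    simp only [List.foldl_cons, List.length_cons, alignGradingStep]
    by_cases h1 : i < 20
    · rw [if_pos h1]
      obtain ⟨hr, hi⟩ := ih (pyAssign ag r 0 a) (r + 1) (i + 1) (by omega) (by omega)
      refine ⟨by rw [hr]; push_cast; ring, ?_⟩
      rw [hi]; split_ifs <;> push_cast at * <;> omega
    · rw [if_neg h1]
      by_cases h2 : i < 40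
      · rw [if_pos h2]
        obtain ⟨hr, hi⟩ := ih (pyAssign ag (r - 20) 1 a) (r + 1) (i + 1) (by omega) (by omega)
        refine ⟨by rw [hr]; push_cast; ring, ?_⟩
        rw [hi]; split_ifs <;> push_cast at * <;> omega
      · rw [if_neg h2]
        obtain ⟨hr, hi⟩ := ih (pyAssign ag (r - 30) 2 a) (r + 1) i (by omega) (by omega)
        refine ⟨by rw [hr]; push_cast; ring, ?_⟩
        rw [hi]; split_ifs <;> push_cast at * <;> omega

lemma A_snoc (g : List Int) (x : Int) :
    alignGrading (g ++ [x]) = applyCell g.length x (alignGrading g) := by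
  obtain ⟨hr, hi⟩ := stateA g alignGradingInit 0 0 (by omega) (by omega)
  show (List.foldl alignGradingStep (alignGradingInit, 0, 0) (g ++ [x])).1 = _
  rw [List.foldl_append, List.foldl_cons, List.foldl_nil]
  set st := List.foldl alignGradingStep (alignGradingInit, 0, 0) g with hst
  show (alignGradingStep st x).1 = applyCell g.length x st.1
  unfold alignGradingStep applyCell
  rw [hr, hi]
  rcases (by omega : (0 + (g.length : Int)) ≤ 40 ∨ ¬ (0 + (g.length : Int)) ≤ 40) with hc | hc
  · rw [if_pos hc]
    simp only [zero_add]
    split_ifs <;> first | rfl | omega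
  · rw [if_neg hc]
    simp only [zero_add]
    split_ifs <;> first | rfl | omega

lemma B_snoc (g : List Int) (x : Int) (h : g.length < 50) :
    alignGrading_alt (g ++ [x]) = applyCell g.length x (alignGrading_alt g) := by
  have s1 : ∀ (l : List Int), PySem.List.slice l (some 0) (some 20) = l.take 20 := by
    intro l
    rw [show ((20:Int)) = ((20:Nat):Int) by norm_num, PySem.List.slice_zero_start,
        PySem.List.slice_to_natCast]
  have s2 : ∀ (l : List Int), PySem.List.slice l (some 20) (some 40) = (l.drop 20).take 20 := by
    intro l
    rw [show ((20:Int)) = ((20:Nat):Int) by norm_num, show ((40:Int)) = ((40:Nat):Int) by norm_num,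
        PySem.List.slice_natCast]
  have s3 : ∀ (l : List Int), PySem.List.slice l (some 40) none = l.drop 40 := by
    intro l
    rw [show ((40:Int)) = ((40:Nat):Int) by norm_num, PySem.List.slice_from_natCast]
  unfold alignGrading_alt applyCell
  rw [s1, s1, s2, s2, s3, s3]
  by_cases h20 : g.length < 20
  · -- item lands in column 0
    rw [if_pos h20]
    have t2 : (g ++ [x]).take 20 = g.take 20 ++ [x] := by
      rw [List.take_append, List.take_of_length_le (by omega)]
      simp; omega
    have t3 : (g ++ [x]).drop 20 = [] := List.drop_eq_nil_of_le (by simp; omega)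
    have t4 : g.drop 20 = [] := List.drop_eq_nil_of_le (by omega)
    have t5 : (g ++ [x]).drop 40 = [] := List.drop_eq_nil_of_le (by simp; omega)
    have t6 : g.drop 40 = [] := List.drop_eq_nil_of_le (by omega)
    have tg : g.take 20 = g := List.take_of_length_le h20.le
    rw [t2, t3, t4, t5, t6, tg, PySem.List.enumerate_append, List.foldl_append]
    simp [PySem.List.enumerate]
  · by_cases h40 : g.length < 40
    · -- item lands in column 1
      rw [if_neg h20, if_pos h40]
      have t1 : (g ++ [x]).take 20 = g.take 20 := List.take_append_of_le_length (by omega)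
      have t2 : (g ++ [x]).drop 20 = g.drop 20 ++ [x] :=
        List.drop_append_of_le_length (by omega)
      have t3 : ((g ++ [x]).drop 20).take 20 = (g.drop 20).take 20 ++ [x] := by
        rw [t2, List.take_append, List.take_of_length_le (by simp; omega)]
        simp; omega
      have t4 : (g ++ [x]).drop 40 = [] := List.drop_eq_nil_of_le (by simp; omega)
      have t5 : g.drop 40 = [] := List.drop_eq_nil_of_le (by omega)
      have tg : (g.drop 20).take 20 = g.drop 20 := List.take_of_length_le (by simp; omega)
      rw [t1, t3, t4, t5, tg, PySem.List.enumerate_append, List.foldl_append]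
      simp only [PySem.List.enumerate, List.foldl_cons, List.foldl_nil]
      congr 2
      simp; omega
    · -- item lands in column 2
      rw [if_neg h20, if_neg h40]
      have t1 : (g ++ [x]).take 20 = g.take 20 := List.take_append_of_le_length (by omega)
      have t2 : ((g ++ [x]).drop 20).take 20 = (g.drop 20).take 20 := by
        rw [List.drop_append_of_le_length (by omega),
            List.take_append_of_le_length (by simp; omega)]
      have t3 : (g ++ [x]).drop 40 = g.drop 40 ++ [x] :=
        List.drop_append_of_le_length (by omega)
      rw [t1, t2, t3, PySem.List.enumerate_append, List.foldl_append]
      simp only [PySem.List.enumerate, List.foldl_cons, List.foldl_nil]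
      congr 2
      simp; omega

lemma align_eq (g : List Int) (h : g.length ≤ 50) :
    alignGrading g = alignGrading_alt g := by
  induction g using List.reverseRecOn with
  | nil => decide
  | append_singleton g x ih =>
    have hlen : g.length < 50 := by simp at h; omega
    rw [A_snoc g x, B_snoc g x hlen, ih (by omega)]

-- ===== VERDICT (by name: the statement is the Claim_ definition above) =====
theorem alignGrading_spec : Claim_equal_alignGrading := by
  intro g _ hp
  unfold Spec_alignGrading
  exact align_eq g hp
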